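-- pv_equiv track=rewrite | github.com/kaleidoscopeAI/goeckoh-site | extracted_code/python/full_project_code__snippet-210.py | _handle_runs
-- ===== SOURCE A (Python) =====
-- def _handle_runs(char_list):  # pragma: no cover
--     buf = []
--     for c in char_list:
--         if len(c) == 1:
--             if buf and buf[-1][1] == chr(ord(c)-1):
--                 buf[-1] = (buf[-1][0], c)
--             else:
--                 buf.append((c, c))
--         else:
--             buf.append((c, c))
--     for a, b in buf:
--         if a == b:
--             yield a
--         else:
--             yield '%s-%s' % (a, b)
-- ===== SOURCE B (Python) =====
-- def _handle_runs(char_list):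
--     run_start = run_end = None
--     for c in char_list:
--         if run_end is not None and len(c) == 1 and run_end == chr(ord(c) - 1):
--             run_end = c
--         else:
--             if run_end is not None:
--                 yield run_start if run_start == run_end else '%s-%s' % (run_start, run_end)
--             run_start = run_end = c
--     if run_end is not None:
--         yield run_start if run_start == run_end else '%s-%s' % (run_start, run_end)
-- ===== Notes on version B (the rewrite author's own statement) =====
-- stated objective: simpler
-- what changed: Single-pass streaming generator keeping only the current run in two locals and yielding each finished run immediately, instead of materialising an intermediate buffer of (start,end) pairs and formatting it in a second loop.
import Mathlib
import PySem

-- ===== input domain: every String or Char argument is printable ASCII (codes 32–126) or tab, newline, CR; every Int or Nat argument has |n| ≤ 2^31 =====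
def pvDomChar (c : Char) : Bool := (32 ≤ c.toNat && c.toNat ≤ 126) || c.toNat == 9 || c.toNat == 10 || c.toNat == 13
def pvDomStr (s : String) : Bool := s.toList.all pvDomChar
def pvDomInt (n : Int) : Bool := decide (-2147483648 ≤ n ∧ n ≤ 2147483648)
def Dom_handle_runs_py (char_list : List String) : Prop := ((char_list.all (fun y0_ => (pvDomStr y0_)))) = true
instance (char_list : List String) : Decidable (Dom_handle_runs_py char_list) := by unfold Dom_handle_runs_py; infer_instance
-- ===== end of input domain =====

-- B replaces A's two-pass buffer-of-pairs scheme by a one-pass stream that keeps only the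
-- current run and emits each finished run immediately (objective: simpler).
-- Both are generators; the equivalence is about the sequence of yielded values, as a list.

-- chr(ord(c)-1) for a one-character string c (both Pythons use this exact expression;
-- on the stated domain ord(c) ≥ 9, so Python never raises and the Nat subtraction is exact)
def pvChrPred (c : String) : String :=
  match c.toList with
  | [ch] => String.mk [Char.ofNat (ch.toNat - 1)]
  | _ => ""

-- ===== PORT A =====
-- A's buffer `buf` is kept in reverse (head = Python's buf[-1]) so that the
-- buf[-1] access/update is head access; it is reversed back before the second loop.
def handle_runs_py_step (buf : List (String × String)) (c : String) : List (String × String) :=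
  if c.length == 1 then
    match buf with
    | (a, b) :: t => if b == pvChrPred c then (a, c) :: t else (c, c) :: (a, b) :: t
    | [] => [(c, c)]
  else (c, c) :: buf

-- A's second loop: for (a, b) in buf: yield a if a == b else '%s-%s' % (a, b)
def pvFmtA (p : String × String) : String :=
  if p.1 == p.2 then p.1 else p.1 ++ "-" ++ p.2

def handle_runs_py (char_list : List String) : List String :=
  ((char_list.foldl handle_runs_py_step []).reverse).map pvFmtA

-- ===== PORT B =====
-- the loop of Source B; the state is the current run (run_start, run_end), None before the first element
def handle_runs_py_alt_go (run : Option (String × String)) : List String → List String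
  | [] =>
      match run with
      | some (s, e) => [if s == e then s else s ++ "-" ++ e]
      | none => []
  | c :: rest =>
      match run with
      | some (s, e) =>
          if c.length == 1 && e == pvChrPred c then
            handle_runs_py_alt_go (some (s, c)) rest
          else
            (if s == e then s else s ++ "-" ++ e) :: handle_runs_py_alt_go (some (c, c)) rest
      | none => handle_runs_py_alt_go (some (c, c)) rest

def handle_runs_py_alt (char_list : List String) : List String :=
  handle_runs_py_alt_go none char_list

-- ===== PRECONDITION & SPEC =====
def Spec_handle_runs_py (char_list : List String) (out : List String) : Prop := out = handle_runs_py_alt char_list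
instance (char_list : List String) (out : List String) : Decidable (Spec_handle_runs_py char_list out) := by unfold Spec_handle_runs_py; infer_instance

-- ===== CLAIM (what is proved, stated in full; the proofs are below) =====
def Claim_equal_handle_runs_py : Prop := ∀ (char_list : List String), Dom_handle_runs_py char_list → Spec_handle_runs_py char_list (handle_runs_py char_list)

-- ===== LEMMAS AND PROOFS =====

-- invariant: A's reversed buffer is (current run) :: (finished runs, reversed);
-- B has already emitted the finished runs and carries the current run in its state.
theorem handle_runs_py_go_fold (rest : List String) :
    ∀ (a b : String) (t : List (String × String)),
      ((rest.foldl handle_runs_py_step ((a, b) :: t)).reverse).map pvFmtA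
        = (t.reverse.map pvFmtA) ++ handle_runs_py_alt_go (some (a, b)) rest := by
  induction rest with
  | nil =>
      intro a b t
      simp [handle_runs_py_alt_go, pvFmtA]
  | cons c rest ih =>
      intro a b t
      by_cases h1 : c.length == 1
      · by_cases h2 : b == pvChrPred c
        · simp [List.foldl_cons, handle_runs_py_step, handle_runs_py_alt_go, h1, h2, ih]
        · simp [List.foldl_cons, handle_runs_py_step, handle_runs_py_alt_go, h1, h2, ih, pvFmtA]
      · simp [List.foldl_cons, handle_runs_py_step, handle_runs_py_alt_go, h1, ih, pvFmtA]

theorem handle_runs_py_step_nil (c : String) : handle_runs_py_step [] c = [(c, c)] := by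
  by_cases h : c.length == 1 <;> simp [handle_runs_py_step, h]

-- ===== VERDICT (by name: the statement is the Claim_ definition above) =====
theorem handle_runs_py_spec : Claim_equal_handle_runs_py := by
  intro char_list _
  unfold Spec_handle_runs_py handle_runs_py handle_runs_py_alt
  cases char_list with
  | nil => simp [handle_runs_py_alt_go]
  | cons c rest =>
      simp [List.foldl_cons, handle_runs_py_step_nil, handle_runs_py_alt_go,
        handle_runs_py_go_fold rest c c []]
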